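-- pv_equiv track=rewrite | github.com/fonarevvichka/simplifier | simplifier.py | simplify_logic
-- ===== SOURCE A (Python) =====
-- def find_difference(term_one, term_two):
--     differences = 0
--     index = -1
--
--     for i in range(0, len(term_one)):
--         if term_one[i] != term_two[i]:
--             differences += 1
--             index = i
--
--     if differences == 1:
--         return index
--     else:
--         return -1
--
-- def simplify_logic(min_terms):
--     augmented_min_term_tuples = []
--     augmented_min_terms = []
--     solo_min_terms = []
--
--     for i in range(0, len(min_terms)):
--         for j in range(0, len(min_terms)):
--             if (i != j):
--                 difference_index = find_difference(min_terms[i], min_terms[j])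
--                 if difference_index != -1:
--                     augmented_min_terms.append(min_terms[i])
--                     augmented_min_terms.append(min_terms[j])
--
--                     augmented_min_term_tuples.append((min_terms[i],
--                                                       difference_index))
--
--                     augmented_min_term_tuples.append((min_terms[j],
--                                                       difference_index))
--         else:
--             if min_terms[i] not in augmented_min_terms:
--                 if min_terms[i] not in solo_min_terms:
--                     solo_min_terms.append(min_terms[i])
--
--     edited_min_terms = []
--     for min_term_tuple in augmented_min_term_tuples:
--         new_min_term = list(min_term_tuple[0])
--         new_min_term[min_term_tuple[1]] = '-'
--
--         edited_min_term = ''.join(new_min_term)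
--         if edited_min_term not in edited_min_terms:
--             edited_min_terms.append(edited_min_term)
--
--     return solo_min_terms + edited_min_terms
-- ===== SOURCE B (Python) =====
-- def masked(t, p):
--     chars = list(t)
--     chars[p] = '-'
--     return ''.join(chars)
--
--
-- def simplify_logic(min_terms):
--     # Group terms by (position, term-with-that-position-masked): two terms are
--     # one-bit-adjacent at p iff they share the key at p and differ at p.
--     # All min-terms have the same width.
--     width = max(len(t) for t in min_terms) if min_terms else 0
--     pairs = []
--     for i in range(len(min_terms)):
--         t = min_terms[i]
--         for p in range(width):
--             pairs.append(((p, masked(t, p)), i))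
--     groups = {}
--     for key, i in pairs:
--         groups.setdefault(key, []).append(i)
--
--     solo_min_terms = []
--     edited_min_terms = []
--     for i in range(len(min_terms)):
--         t = min_terms[i]
--         partners = []
--         for p in range(width):
--             for j in groups[(p, masked(t, p))]:
--                 if j != i and min_terms[j][p] != t[p]:
--                     partners.append((j, masked(t, p)))
--         if partners:
--             partners.sort(key=lambda pr: pr[0])
--             for _, m in partners:
--                 if m not in edited_min_terms:
--                     edited_min_terms.append(m)
--         else:
--             if t not in solo_min_terms:
--                 solo_min_terms.append(t)
--     return solo_min_terms + edited_min_terms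
-- ===== Notes on version B (the rewrite author's own statement) =====
-- stated objective: faster
-- what changed: Replaces the all-pairs O(n^2*L) scan (find_difference on every ordered pair) by hashing every term under each of its L single-position masks into a dict, so adjacency partners are read off the mask groups; partner lists are sorted by index to reproduce A's emission order.
import Mathlib
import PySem

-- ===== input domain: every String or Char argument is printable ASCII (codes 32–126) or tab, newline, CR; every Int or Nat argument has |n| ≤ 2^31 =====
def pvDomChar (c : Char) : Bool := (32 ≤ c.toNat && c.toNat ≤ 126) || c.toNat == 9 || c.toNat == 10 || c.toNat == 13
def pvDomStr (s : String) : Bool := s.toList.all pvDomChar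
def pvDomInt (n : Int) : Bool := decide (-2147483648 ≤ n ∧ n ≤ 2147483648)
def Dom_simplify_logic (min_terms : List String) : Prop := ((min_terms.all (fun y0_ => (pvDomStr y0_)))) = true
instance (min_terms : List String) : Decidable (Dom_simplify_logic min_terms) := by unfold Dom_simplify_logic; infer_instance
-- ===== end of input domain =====

-- B replaces A's all-pairs scan by hashing each term under each single-position mask
-- (dict groups) and reading adjacency partners off the groups; objective: faster.


-- ===== PORT A =====
-- find_difference: Python indexes term_two[i] for i < len(term_one); `.getD ' '` is exact
-- whenever len(term_two) ≥ len(term_one) (guaranteed under Pre_, where all lengths are equal).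
def find_difference (term_one term_two : String) : Int :=
  let st := (PySem.List.pyRange 0 (PySem.Str.len term_one)).foldl
    (fun (st : Int × Int) i =>
      if (PySem.Str.pyGet? term_one i).getD ' ' ≠ (PySem.Str.pyGet? term_two i).getD ' '
      then (st.1 + 1, i) else st) (0, -1)
  if st.1 = 1 then st.2 else -1

def simplify_logic (min_terms : List String) : List String :=
  let st := (PySem.List.pyRange 0 (min_terms.length : Int)).foldl
    (fun (st : List (String × Int) × List String × List String) i =>
      let inner := (PySem.List.pyRange 0 (min_terms.length : Int)).foldl
        (fun (st2 : List (String × Int) × List String) j =>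
          if i ≠ j then
            let ti := PySem.List.pyGetD min_terms i ""
            let tj := PySem.List.pyGetD min_terms j ""
            let d := find_difference ti tj
            if d ≠ -1 then
              (st2.1 ++ [(ti, d), (tj, d)], st2.2 ++ [ti, tj])
            else st2
          else st2) (st.1, st.2.1)
      let ti := PySem.List.pyGetD min_terms i ""
      let solo := if ti ∉ inner.2 ∧ ti ∉ st.2.2 then st.2.2 ++ [ti] else st.2.2
      (inner.1, inner.2, solo)) ([], [], [])
  let edited := st.1.foldl
    (fun ed tup =>
      -- new_min_term[idx] = '-' : idx is a found difference index, nonnegative and in range here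
      let nm := String.ofList (tup.1.toList.set tup.2.toNat '-')
      if nm ∈ ed then ed else ed ++ [nm]) []
  st.2.2 ++ edited

-- ===== PORT B =====
-- masked: chars = list(t); chars[p] = '-'; ''.join(chars).
-- `.set p.toNat` is exact for 0 ≤ p < len t (always the case where B evaluates it under Pre_).
def pvMask (t : String) (p : Int) : String :=
  String.ofList (t.toList.set p.toNat '-')

def simplify_logic_alt (min_terms : List String) : List String :=
  -- width = max(len(t) for t in min_terms) if min_terms else 0
  let width : Int := if min_terms ≠ [] then
    (PySem.List.max? (min_terms.map PySem.Str.len) (fun x => x)).getD 0 else 0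
  let pairs := (PySem.List.pyRange 0 (min_terms.length : Int)).foldl
    (fun (acc : List ((Int × String) × Int)) i =>
      let t := PySem.List.pyGetD min_terms i ""
      (PySem.List.pyRange 0 width).foldl
        (fun acc p => acc ++ [((p, pvMask t p), i)]) acc) []
  let groups := pairs.foldl
    (fun (d : PySem.Dict (Int × String) (List Int)) kv =>
      d.modify kv.1 [] (fun v => v ++ [kv.2])) PySem.Dict.empty
  let st := (PySem.List.pyRange 0 (min_terms.length : Int)).foldl
    (fun (st : List String × List String) i =>
      let t := PySem.List.pyGetD min_terms i ""
      let partners := (PySem.List.pyRange 0 width).foldl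
        (fun ps p =>
          (groups.getD (p, pvMask t p) []).foldl
            (fun ps j =>
              if j ≠ i ∧ (PySem.Str.pyGet? (PySem.List.pyGetD min_terms j "") p).getD ' ' ≠
                         (PySem.Str.pyGet? t p).getD ' '
              then ps ++ [(j, pvMask t p)] else ps) ps) ([] : List (Int × String))
      if partners ≠ [] then
        let sp := PySem.List.sorted partners (fun pr => pr.1)
        (st.1, sp.foldl (fun ed pr => if pr.2 ∈ ed then ed else ed ++ [pr.2]) st.2)
      else
        (if t ∈ st.1 then st.1 else st.1 ++ [t], st.2)) ([], [])
  st.1 ++ st.2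

-- ===== PRECONDITION & SPEC =====
-- Pre_ excludes exactly the inputs where A raises IndexError: two terms of different
-- lengths make find_difference index past the shorter one (nothing is claimed there).
def Pre_simplify_logic (min_terms : List String) : Prop :=
  ∀ s ∈ min_terms, ∀ t ∈ min_terms, s.toList.length = t.toList.length
instance (min_terms : List String) : Decidable (Pre_simplify_logic min_terms) := by
  unfold Pre_simplify_logic; infer_instance

def pvWitness_simplify_logic : List String := ["00", "01", "11"]

def Spec_simplify_logic (min_terms : List String) (out : List String) : Prop := out = simplify_logic_alt min_terms
instance (min_terms : List String) (out : List String) : Decidable (Spec_simplify_logic min_terms out) := by unfold Spec_simplify_logic; infer_instance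

-- ===== CLAIM (what is proved, stated in full; the proofs are below) =====
def Claim_equal_simplify_logic : Prop := ∀ (min_terms : List String), Dom_simplify_logic min_terms → Pre_simplify_logic min_terms → Spec_simplify_logic min_terms (simplify_logic min_terms)

-- ===== LEMMAS AND PROOFS =====

-- `w ts i` = min_terms[i] (the "" default is never hit on the indices we use)
def pvW (ts : List String) (i : Nat) : String := ts.getD i ""

-- positions where two equal-length char lists differ
def pvDiffs (s t : List Char) : List Nat :=
  (List.range s.length).filter (fun q => decide (s[q]? ≠ t[q]?))

-- some p = the two lists differ exactly at p
def pvAdj? (s t : List Char) : Option Nat :=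
  match pvDiffs s t with
  | [p] => some p
  | _ => none

def pvHasP (ts : List String) (i : Nat) : Prop :=
  ∃ j < ts.length, j ≠ i ∧ pvAdj? (pvW ts i).toList (pvW ts j).toList ≠ none

-- Bool form of pvHasP, so the solo-loop needs no extra Decidable instance
def pvHasPb (ts : List String) (i : Nat) : Bool :=
  (List.range ts.length).any (fun j =>
    decide (j ≠ i) && (pvAdj? (pvW ts i).toList (pvW ts j).toList).isSome)

def pvMaskL (s : List Char) (p : Nat) : List Char := s.set p '-'

-- A's tuple block for the ordered pair (i, j)
def pvBlockT (ts : List String) (i j : Nat) : List (String × Int) :=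
  if i ≠ j then
    match pvAdj? (pvW ts i).toList (pvW ts j).toList with
    | some p => [(pvW ts i, (p : Int)), (pvW ts j, (p : Int))]
    | none => []
  else []

-- the corresponding masked-string block (single copy)
def pvBlockM (ts : List String) (i j : Nat) : List String :=
  if i ≠ j then
    match pvAdj? (pvW ts i).toList (pvW ts j).toList with
    | some p => [String.ofList (pvMaskL (pvW ts i).toList p)]
    | none => []
  else []

def pvTups (ts : List String) (k : Nat) : List (String × Int) :=
  (List.range k).flatMap (fun i => (List.range ts.length).flatMap (fun j => pvBlockT ts i j))

def pvSoloStep (ts : List String) (acc : List String) (i : Nat) : List String :=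
  if pvHasPb ts i = false ∧ pvW ts i ∉ acc then acc ++ [pvW ts i] else acc

def pvSolo (ts : List String) : List String :=
  (List.range ts.length).foldl (pvSoloStep ts) []

def pvMA (ts : List String) : List String :=
  (List.range ts.length).flatMap (fun i =>
    (List.range ts.length).flatMap (fun j => pvBlockM ts i j ++ pvBlockM ts i j))

def pvMB (ts : List String) : List String :=
  (List.range ts.length).flatMap (fun i =>
    (List.range ts.length).flatMap (fun j => pvBlockM ts i j))

-- B's sorted partner list for row i
def pvTarget (ts : List String) (i : Nat) : List (Int × String) :=
  (List.range ts.length).flatMap (fun j =>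
    if i ≠ j then
      match pvAdj? (pvW ts i).toList (pvW ts j).toList with
      | some p => [((j : Int), String.ofList (pvMaskL (pvW ts i).toList p))]
      | none => []
    else [])

theorem pv_fold_count (d : Nat → Bool) (l : List Nat) (c x : Int) :
    l.foldl (fun st q => if d q then (st.1 + 1, (q : Int)) else st) (c, x)
      = (c + ((l.filter d).length : Int),
         (((l.filter d).map (fun q => (q : Int))).getLast?.getD x)) := by
  induction l using List.reverseRecOn generalizing c x with
  | nil => simp
  | append_singleton l q ih =>
      rw [List.foldl_append, ih, List.filter_append]
      by_cases hq : d q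
      · simp [hq, List.getLast?_append]; ring
      · simp [hq]

theorem pv_fd (s t : String) (h : s.toList.length = t.toList.length) :
    find_difference s t
      = (match pvAdj? s.toList t.toList with
         | some p => (p : Int)
         | none => -1) := by
  unfold find_difference
  rw [PySem.Str.len_eq, PySem.List.pyRange_zero_natCast, List.foldl_map]
  rw [PySem.List.foldl_congr_mem _ _
    (fun (st : Int × Int) (q : Nat) =>
      if decide (s.toList[q]? ≠ t.toList[q]?) then (st.1 + 1, (q : Int)) else st) _ ?_]
  · rw [pv_fold_count]
    have hD : (List.range s.toList.length).filter
        (fun q => decide (s.toList[q]? ≠ t.toList[q]?)) = pvDiffs s.toList t.toList := rfl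
    rw [hD]
    rcases hd : pvDiffs s.toList t.toList with _ | ⟨p, _ | ⟨q, rest⟩⟩
    · simp [pvAdj?, hd]
    · simp [pvAdj?, hd]
    · have hne : ¬ ((rest.length : Int) + 1 + 1 = 1) := by omega
      simp [pvAdj?, hd]
      omega
  · intro acc q hq
    simp only [List.mem_range] at hq
    have e1 := List.getElem?_eq_getElem hq
    have e2 := List.getElem?_eq_getElem (h ▸ hq)
    rw [PySem.Str.pyGet?_natCast, PySem.Str.pyGet?_natCast]
    simp [e1, e2]

theorem pvHasPb_iff (ts : List String) (i : Nat) :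
    pvHasPb ts i = false ↔ ¬ pvHasP ts i := by
  rw [← Bool.not_eq_true]
  unfold pvHasPb pvHasP
  simp [List.any_eq_true, Option.isSome_iff_ne_none]

theorem pv_mem_diffs {s t : List Char} {q : Nat} :
    q ∈ pvDiffs s t ↔ q < s.length ∧ s[q]? ≠ t[q]? := by
  simp [pvDiffs, List.mem_filter]

theorem pv_mem_of_adj {s t : List Char} {p : Nat} (h : pvAdj? s t = some p) :
    p ∈ pvDiffs s t := by
  unfold pvAdj? at h
  rcases hd : pvDiffs s t with _ | ⟨a, _ | _⟩ <;> rw [hd] at h <;> simp_all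

theorem pvAdj?_lt {s t : List Char} {p : Nat} (h : pvAdj? s t = some p) : p < s.length :=
  (pv_mem_diffs.mp (pv_mem_of_adj h)).1

theorem pvAdj?_getElem_ne {s t : List Char} {p : Nat} (h : pvAdj? s t = some p) :
    s[p]? ≠ t[p]? :=
  (pv_mem_diffs.mp (pv_mem_of_adj h)).2

theorem pvAdj?_off {s t : List Char} {p : Nat} (hlen : s.length = t.length)
    (h : pvAdj? s t = some p) {q : Nat} (hq : q ≠ p) : s[q]? = t[q]? := by
  by_cases hql : q < s.length
  · by_contra hne
    have hmem : q ∈ pvDiffs s t := pv_mem_diffs.mpr ⟨hql, hne⟩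
    unfold pvAdj? at h
    rcases hd : pvDiffs s t with _ | ⟨a, _ | _⟩ <;> rw [hd] at h <;> simp_all
  · rw [List.getElem?_eq_none (by omega), List.getElem?_eq_none (by omega)]

theorem pvDiffs_symm {s t : List Char} (hlen : s.length = t.length) :
    pvDiffs s t = pvDiffs t s := by
  unfold pvDiffs
  rw [hlen]
  exact List.filter_congr (fun q _ => by
    simp only [decide_eq_decide]; constructor <;> exact fun h => fun e => h e.symm)

theorem pvAdj?_symm {s t : List Char} (hlen : s.length = t.length) :
    pvAdj? s t = pvAdj? t s := by
  unfold pvAdj?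
  rw [pvDiffs_symm hlen]

theorem pvAdj?_self (s : List Char) : pvAdj? s s = none := by
  unfold pvAdj?
  have : pvDiffs s s = [] := by
    unfold pvDiffs
    exact List.filter_eq_nil_iff.mpr (fun q _ => by simp)
  rw [this]

theorem pvAdj?_ne_of_some {s t : List Char} {p : Nat} (h : pvAdj? s t = some p) : s ≠ t := by
  intro he
  rw [he] at h
  simp [pvAdj?_self] at h

theorem pv_range_filter_beq (n p : Nat) (hp : p < n) :
    (List.range n).filter (fun q => q == p) = [p] := by
  induction n with
  | zero => omega
  | succ m ih =>
      rw [List.range_succ, List.filter_append]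
      by_cases hpm : p = m
      · subst hpm
        have h0 : (List.range p).filter (fun q => q == p) = [] :=
          List.filter_eq_nil_iff.mpr (fun q hq => by simp at hq ⊢; omega)
        simp [h0]
      · have hplt : p < m := by omega
        have hne : (m == p) = false := by simp; omega
        simp [ih hplt, hne]

theorem pv_filter_eq_single {n p : Nat} {P : Nat → Bool} (hp : p < n) (hP : P p = true)
    (huniq : ∀ q, q < n → P q = true → q = p) :
    (List.range n).filter P = [p] := by
  have h1 : (List.range n).filter P = (List.range n).filter (fun q => q == p) := by
    apply List.filter_congr
    intro q hq
    simp only [List.mem_range] at hq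
    by_cases hqp : q = p
    · subst hqp; simp [hP]
    · have hnq : P q = false := by
        cases hPq : P q
        · rfl
        · exact absurd (huniq q hq hPq) hqp
      simp [hnq, hqp]
  rw [h1, pv_range_filter_beq n p hp]

theorem pvAdj?_mask {s t : List Char} {p : Nat} (hlen : s.length = t.length)
    (h : pvAdj? s t = some p) : s.set p '-' = t.set p '-' := by
  apply List.ext_getElem?
  intro q
  rw [List.getElem?_set, List.getElem?_set]
  by_cases hqp : p = q
  · subst hqp; simp [hlen]
  · simp only [if_neg hqp]
    exact pvAdj?_off hlen h (fun e => hqp e.symm)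

theorem pvAdj?_iff {s t : List Char} {p : Nat} (hlen : s.length = t.length)
    (hp : p < s.length) :
    pvAdj? s t = some p ↔ (s.set p '-' = t.set p '-' ∧ s[p]? ≠ t[p]?) := by
  constructor
  · exact fun h => ⟨pvAdj?_mask hlen h, pvAdj?_getElem_ne h⟩
  · rintro ⟨hm, hne⟩
    have hoff : ∀ q, q ≠ p → s[q]? = t[q]? := by
      intro q hq
      have := congrArg (fun l => l[q]?) hm
      simp only [List.getElem?_set, if_neg (fun e : p = q => hq e.symm)] at this
      exact this
    unfold pvAdj?
    have hD : pvDiffs s t = [p] := by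
      unfold pvDiffs
      apply pv_filter_eq_single hp
      · simpa using hne
      · intro q _ hPq
        by_contra hqp
        exact (by simpa using hPq : s[q]? ≠ t[q]?) (hoff q hqp)
    rw [hD]

def pvBlockA (ts : List String) (i j : Nat) : List String :=
  if i ≠ j then
    match pvAdj? (pvW ts i).toList (pvW ts j).toList with
    | some _ => [pvW ts i, pvW ts j]
    | none => []
  else []

def pvAug' (ts : List String) (k : Nat) : List String :=
  (List.range k).flatMap (fun i => (List.range ts.length).flatMap (fun j => pvBlockA ts i j))

def pvSoloAux (ts : List String) : Nat → List String
  | 0 => []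
  | k + 1 =>
      if pvW ts k ∉ pvAug' ts (k + 1) ∧ pvW ts k ∉ pvSoloAux ts k
      then pvSoloAux ts k ++ [pvW ts k] else pvSoloAux ts k

def pvStepA (ts : List String) (st : List (String × Int) × List String × List String)
    (i : Nat) : List (String × Int) × List String × List String :=
  (st.1 ++ (List.range ts.length).flatMap (pvBlockT ts i),
   st.2.1 ++ (List.range ts.length).flatMap (pvBlockA ts i),
   if pvW ts i ∉ st.2.1 ++ (List.range ts.length).flatMap (pvBlockA ts i) ∧ pvW ts i ∉ st.2.2
   then st.2.2 ++ [pvW ts i] else st.2.2)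

theorem pvW_mem {ts : List String} {i : Nat} (hi : i < ts.length) : pvW ts i ∈ ts := by
  unfold pvW
  rw [List.getD_eq_getElem?_getD, List.getElem?_eq_getElem hi]
  exact List.getElem_mem hi

theorem pv_len_eq {ts : List String} (h : Pre_simplify_logic ts) {i j : Nat}
    (hi : i < ts.length) (hj : j < ts.length) :
    (pvW ts i).toList.length = (pvW ts j).toList.length :=
  h _ (pvW_mem hi) _ (pvW_mem hj)

theorem pv_pyGetD_W (ts : List String) (i : Nat) :
    PySem.List.pyGetD ts (i : Int) "" = pvW ts i := by
  rw [PySem.List.pyGetD_natCast]; rfl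

-- width = max of the term lengths equals each term's length under Pre_
theorem pv_width_eq (ts : List String) (h : Pre_simplify_logic ts) (i : Nat)
    (hi : i < ts.length) :
    (if ts ≠ [] then (PySem.List.max? (ts.map PySem.Str.len) (fun x => x)).getD 0 else 0)
      = ((pvW ts i).toList.length : Int) := by
  have hne : ts ≠ [] := by
    intro e; subst e; simp at hi
  rw [if_pos hne]
  rcases hm : PySem.List.max? (ts.map PySem.Str.len) (fun x => x) with _ | m
  · have := (PySem.List.max?_eq_none_iff (ts.map PySem.Str.len) (fun x => x)).mp hm
    simp [hne] at this
  · have hmem : m ∈ ts.map PySem.Str.len := PySem.List.max?_mem hm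
    obtain ⟨t, ht, rfl⟩ := List.mem_map.mp hmem
    have hlen : t.toList.length = (pvW ts i).toList.length := h t ht _ (pvW_mem hi)
    simp [PySem.Str.len_eq, hlen]

theorem pv_foldInner (ts : List String) (i : Nat) (l : List Nat)
    (a : List (String × Int)) (b : List String) :
    l.foldl (fun st2 j => (st2.1 ++ pvBlockT ts i j, st2.2 ++ pvBlockA ts i j)) (a, b)
      = (a ++ l.flatMap (pvBlockT ts i), b ++ l.flatMap (pvBlockA ts i)) := by
  rw [PySem.List.foldl_prod_mk (f := fun s j => s ++ pvBlockT ts i j)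
        (g := fun s j => s ++ pvBlockA ts i j),
      PySem.List.foldl_append_eq_flatMap, PySem.List.foldl_append_eq_flatMap]

theorem pv_stepA_inner (ts : List String) (h : Pre_simplify_logic ts) (i : Nat)
    (hi : i < ts.length) (j : Nat) (hj : j < ts.length)
    (st2 : List (String × Int) × List String) :
    (if (i : Int) ≠ (j : Int) then
       if find_difference (PySem.List.pyGetD ts (i : Int) "") (PySem.List.pyGetD ts (j : Int) "") ≠ -1 then
         (st2.1 ++ [(PySem.List.pyGetD ts (i : Int) "", find_difference (PySem.List.pyGetD ts (i : Int) "") (PySem.List.pyGetD ts (j : Int) "")),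
                    (PySem.List.pyGetD ts (j : Int) "", find_difference (PySem.List.pyGetD ts (i : Int) "") (PySem.List.pyGetD ts (j : Int) ""))],
          st2.2 ++ [PySem.List.pyGetD ts (i : Int) "", PySem.List.pyGetD ts (j : Int) ""])
       else st2
     else st2)
      = (st2.1 ++ pvBlockT ts i j, st2.2 ++ pvBlockA ts i j) := by
  rw [pv_pyGetD_W, pv_pyGetD_W]
  by_cases hij : i = j
  · subst hij
    simp [pvBlockT, pvBlockA]
  · have hcast : ((i : Int) ≠ (j : Int)) := by exact_mod_cast hij
    rw [if_pos hcast]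
    rw [pv_fd _ _ (pv_len_eq h hi hj)]
    rcases ha : pvAdj? (pvW ts i).toList (pvW ts j).toList with _ | p
    · simp [pvBlockT, pvBlockA, hij, ha]
    · have hp : ((p : Int) ≠ -1) := by omega
      simp [pvBlockT, pvBlockA, hij, ha, hp]

theorem pv_foldA (ts : List String) (k : Nat) :
    (List.range k).foldl (pvStepA ts) ([], [], [])
      = (pvTups ts k, pvAug' ts k, pvSoloAux ts k) := by
  induction k with
  | zero => simp [pvTups, pvAug', pvSoloAux]
  | succ m ih =>
      rw [List.range_succ, List.foldl_append, ih]
      simp only [List.foldl_cons, List.foldl_nil, pvStepA]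
      refine Prod.ext ?_ (Prod.ext ?_ ?_)
      · simp [pvTups, List.range_succ]
      · simp [pvAug', List.range_succ]
      · show _ = pvSoloAux ts (m + 1)
        have haug : pvAug' ts m ++ (List.range ts.length).flatMap (pvBlockA ts m)
            = pvAug' ts (m + 1) := by
          simp [pvAug', List.range_succ]
        simp only [pvSoloAux, haug]

theorem pv_mem_blockA {ts : List String} {i j : Nat} {x : String} :
    x ∈ pvBlockA ts i j ↔
      i ≠ j ∧ pvAdj? (pvW ts i).toList (pvW ts j).toList ≠ none ∧ (x = pvW ts i ∨ x = pvW ts j) := by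
  unfold pvBlockA
  by_cases hij : i = j
  · simp [hij]
  · rcases ha : pvAdj? (pvW ts i).toList (pvW ts j).toList with _ | p <;> simp [hij, ha]

theorem pv_aug_mem {ts : List String} (h : Pre_simplify_logic ts) {k : Nat}
    (hk : k < ts.length) : pvW ts k ∈ pvAug' ts (k + 1) ↔ pvHasP ts k := by
  constructor
  · intro hmem
    rw [pvAug'] at hmem
    simp only [List.mem_flatMap, List.mem_range] at hmem
    obtain ⟨i, hik, j, hjn, hx⟩ := hmem
    rw [pv_mem_blockA] at hx
    obtain ⟨hij, hadj, hor⟩ := hx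
    have hin : i < ts.length := by omega
    rcases ha : pvAdj? (pvW ts i).toList (pvW ts j).toList with _ | p
    · exact absurd ha hadj
    rcases hor with he | he
    · -- w k = w i : j is a partner of k
      have hjk : j ≠ k := by
        intro e; subst e
        rw [he] at ha
        exact pvAdj?_ne_of_some ha rfl
      refine ⟨j, hjn, hjk, ?_⟩
      rw [he]; simp [ha]
    · -- w k = w j : i is a partner of k
      have hsym : pvAdj? (pvW ts j).toList (pvW ts i).toList = some p := by
        rw [pvAdj?_symm (pv_len_eq h hjn hin)]; exact ha
      have hik' : i ≠ k := by
        intro e; subst e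
        rw [he] at hsym
        exact pvAdj?_ne_of_some hsym rfl
      refine ⟨i, hin, hik', ?_⟩
      rw [he]; simp [hsym]
  · rintro ⟨j, hjn, hjk, hadj⟩
    rw [pvAug']
    simp only [List.mem_flatMap, List.mem_range]
    exact ⟨k, by omega, j, hjn, pv_mem_blockA.mpr ⟨Ne.symm hjk, hadj, Or.inl rfl⟩⟩

theorem pv_soloAux_eq {ts : List String} (h : Pre_simplify_logic ts) :
    ∀ k, k ≤ ts.length → pvSoloAux ts k = (List.range k).foldl (pvSoloStep ts) [] := by
  intro k
  induction k with
  | zero => intro _; rfl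
  | succ m ih =>
      intro hm
      rw [List.range_succ, List.foldl_append, ← ih (by omega)]
      simp only [List.foldl_cons, List.foldl_nil, pvSoloAux, pvSoloStep]
      have hmem := pv_aug_mem h (show m < ts.length by omega)
      have hb := pvHasPb_iff ts m
      by_cases hP : pvHasP ts m
      · have h1 : ¬ (pvW ts m ∉ pvAug' ts (m + 1) ∧ pvW ts m ∉ pvSoloAux ts m) :=
          fun hc => hc.1 (hmem.mpr hP)
        have h2 : ¬ (pvHasPb ts m = false ∧ pvW ts m ∉ pvSoloAux ts m) :=
          fun hc => (hb.mp hc.1) hP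
        rw [if_neg h1, if_neg h2]
      · by_cases hs : pvW ts m ∈ pvSoloAux ts m
        · have h1 : ¬ (pvW ts m ∉ pvAug' ts (m + 1) ∧ pvW ts m ∉ pvSoloAux ts m) :=
            fun hc => hc.2 hs
          have h2 : ¬ (pvHasPb ts m = false ∧ pvW ts m ∉ pvSoloAux ts m) :=
            fun hc => hc.2 hs
          rw [if_neg h1, if_neg h2]
        · rw [if_pos ⟨fun hmm => hP (hmem.mp hmm), hs⟩, if_pos ⟨hb.mpr hP, hs⟩]

def pvMF (tup : String × Int) : String := String.ofList (tup.1.toList.set tup.2.toNat '-')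

theorem pv_map_blockT {ts : List String} (h : Pre_simplify_logic ts) {i j : Nat}
    (hi : i < ts.length) (hj : j < ts.length) :
    (pvBlockT ts i j).map pvMF = pvBlockM ts i j ++ pvBlockM ts i j := by
  unfold pvBlockT pvBlockM
  by_cases hij : i = j
  · simp [hij]
  · rcases ha : pvAdj? (pvW ts i).toList (pvW ts j).toList with _ | p
    · simp [hij]
    · have hmask : (pvW ts i).toList.set p '-' = (pvW ts j).toList.set p '-' :=
        pvAdj?_mask (pv_len_eq h hi hj) ha
      simp [hij, pvMF, pvMaskL, hmask]

theorem pv_map_tups {ts : List String} (h : Pre_simplify_logic ts) :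
    (pvTups ts ts.length).map pvMF = pvMA ts := by
  unfold pvTups pvMA
  rw [List.map_flatMap]
  rw [List.flatMap_def, List.flatMap_def]
  refine congrArg List.flatten ?_
  apply List.map_congr_left
  intro i hi
  rw [List.map_flatMap, List.flatMap_def, List.flatMap_def]
  refine congrArg List.flatten ?_
  apply List.map_congr_left
  intro j hj
  exact pv_map_blockT h (List.mem_range.mp hi) (List.mem_range.mp hj)

theorem pv_A_eq (ts : List String) (h : Pre_simplify_logic ts) :
    simplify_logic ts = pvSolo ts ++ PySem.Set.ofList (pvMA ts) := by
  unfold simplify_logic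
  simp only [PySem.List.pyRange_zero_natCast, List.foldl_map]
  rw [PySem.List.foldl_congr_mem (List.range ts.length) _ (pvStepA ts) ([], [], [])
    (by
      intro acc i hi
      have hin : i < ts.length := List.mem_range.mp hi
      rw [PySem.List.foldl_congr_mem (List.range ts.length) _
        (fun st2 j => (st2.1 ++ pvBlockT ts i j, st2.2 ++ pvBlockA ts i j)) (acc.1, acc.2.1)
        (fun st2 j hj => pv_stepA_inner ts h i hin j (List.mem_range.mp hj) st2)]
      rw [pv_foldInner]
      simp only [pv_pyGetD_W, pvStepA])]
  rw [pv_foldA]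
  simp only
  rw [pv_soloAux_eq h ts.length le_rfl]
  rw [PySem.List.foldl_congr_mem (pvTups ts ts.length) _
    (fun ed tup => PySem.Set.add ed (pvMF tup)) []
    (fun ed tup _ => by simp only [pvMF]; exact (PySem.Set.add_eq_ite ed _).symm)]
  rw [show (List.foldl (fun ed tup => PySem.Set.add ed (pvMF tup)) [] (pvTups ts ts.length))
      = List.foldl PySem.Set.add [] ((pvTups ts ts.length).map pvMF) from (List.foldl_map).symm]
  rw [← PySem.Set.ofList_eq_foldl, pv_map_tups h, pvSolo]

theorem pv_flatMap_if {α : Type} (l : List Nat) (P : Nat → Prop) [DecidablePred P]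
    (f : Nat → α) :
    (l.flatMap (fun j => if P j then [f j] else []))
      = ((l.filter (fun j => decide (P j))).map f) := by
  induction l with
  | nil => rfl
  | cons a l ih =>
      by_cases hP : P a <;> simp [hP, ih]

theorem pv_pvMask_eq (t : String) (p : Nat) (_hp : p < t.toList.length) :
    pvMask t (p : Int) = String.ofList (pvMaskL t.toList p) := by
  unfold pvMask pvMaskL
  rw [Int.toNat_natCast]

def pvPairs (ts : List String) : List ((Int × String) × Int) :=
  (List.range ts.length).flatMap (fun i =>
    (List.range (pvW ts i).toList.length).map (fun (p : Nat) =>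
      (((p : Int), pvMask (pvW ts i) (p : Int)), (i : Int))))

theorem pv_fm_filter_map {α β : Type} (P : β → Bool) (l : List Nat) (F : Nat → List β)
    (g : β → α) :
    ((l.flatMap F).filter P).map g = l.flatMap (fun i => ((F i).filter P).map g) := by
  induction l with
  | nil => rfl
  | cons a l ih => simp [List.filter_append, List.map_append, ih]

theorem pv_flatMap_congr {α β : Type} {l : List α} {f g : α → List β}
    (h : ∀ x ∈ l, f x = g x) : l.flatMap f = l.flatMap g := by
  simp only [List.flatMap_def]
  exact congrArg List.flatten (List.map_congr_left h)

theorem pv_groups_getD (ts : List String) (h : Pre_simplify_logic ts) (i : Nat)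
    (hi : i < ts.length) (p : Nat) (hp : p < (pvW ts i).toList.length) :
    ((pvPairs ts).foldl (fun d kv => d.modify kv.1 [] (fun v => v ++ [kv.2]))
        PySem.Dict.empty).getD ((p : Int), pvMask (pvW ts i) (p : Int)) []
      = (List.range ts.length).flatMap (fun j =>
          if pvMask (pvW ts j) (p : Int) = pvMask (pvW ts i) (p : Int)
          then [(j : Int)] else []) := by
  rw [PySem.Dict.getD_foldl_modify_append, PySem.Dict.getD_empty]
  unfold pvPairs
  rw [List.nil_append, pv_fm_filter_map]
  apply pv_flatMap_congr
  intro i' hi'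
  have hL : (pvW ts i').toList.length = (pvW ts i).toList.length :=
    pv_len_eq h (List.mem_range.mp hi') hi
  rw [List.filter_map, List.map_map]
  by_cases hd : pvMask (pvW ts i') (p : Int) = pvMask (pvW ts i) (p : Int)
  · have hfil : (List.range (pvW ts i').toList.length).filter
        ((fun pr => pr.1 == ((p : Int), pvMask (pvW ts i) (p : Int))) ∘
          (fun (q : Nat) => (((q : Int), pvMask (pvW ts i') (q : Int)), (i' : Int)))) = [p] := by
      apply pv_filter_eq_single (by omega)
      · simp [hd]
      · intro q _ hq
        simp only [Function.comp, beq_iff_eq, Prod.mk.injEq, decide_eq_true_eq] at hq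
        exact_mod_cast hq.1
    rw [hfil]
    simp [hd]
  · have hfil : (List.range (pvW ts i').toList.length).filter
        ((fun pr => pr.1 == ((p : Int), pvMask (pvW ts i) (p : Int))) ∘
          (fun (q : Nat) => (((q : Int), pvMask (pvW ts i') (q : Int)), (i' : Int)))) = [] := by
      apply List.filter_eq_nil_iff.mpr
      intro q _
      simp only [Function.comp, beq_iff_eq, Prod.mk.injEq, decide_eq_true_eq]
      rintro ⟨h1, h2⟩
      exact hd (by rw [show q = p from by exact_mod_cast h1] at h2; exact h2)
    rw [hfil]
    simp [hd]

def pvPartnersL (ts : List String) (i : Nat) : List (Int × String) :=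
  (List.range (pvW ts i).toList.length).flatMap (fun p =>
    (List.range ts.length).flatMap (fun j =>
      if pvAdj? (pvW ts i).toList (pvW ts j).toList = some p ∧ i ≠ j
      then [((j : Int), pvMask (pvW ts i) (p : Int))] else []))

theorem pv_adjcond (ts : List String) (h : Pre_simplify_logic ts) {i j p : Nat}
    (hi : i < ts.length) (hj : j < ts.length) (hp : p < (pvW ts i).toList.length) :
    (((j : Int) ≠ (i : Int) ∧
        (PySem.Str.pyGet? (pvW ts j) (p : Int)).getD ' ' ≠
          (PySem.Str.pyGet? (pvW ts i) (p : Int)).getD ' ') ∧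
      pvMask (pvW ts j) (p : Int) = pvMask (pvW ts i) (p : Int))
      ↔ (pvAdj? (pvW ts i).toList (pvW ts j).toList = some p ∧ i ≠ j) := by
  have hlen : (pvW ts i).toList.length = (pvW ts j).toList.length := pv_len_eq h hi hj
  have hpj : p < (pvW ts j).toList.length := by omega
  have e1 := List.getElem?_eq_getElem hp
  have e2 := List.getElem?_eq_getElem hpj
  rw [PySem.Str.pyGet?_natCast, PySem.Str.pyGet?_natCast, e1, e2]
  rw [pv_pvMask_eq _ _ hpj, pv_pvMask_eq _ _ hp]
  rw [pvAdj?_iff hlen hp]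
  constructor
  · rintro ⟨⟨hne, hc⟩, hm⟩
    have hmL : pvMaskL (pvW ts j).toList p = pvMaskL (pvW ts i).toList p := by
      have := congrArg String.toList hm
      simpa [String.toList_ofList] using this
    refine ⟨⟨hmL.symm, ?_⟩, by exact_mod_cast hne.symm⟩
    rw [e1, e2]
    simp only [Option.getD_some] at hc
    simp [hc.symm]
  · rintro ⟨⟨hm, hc⟩, hij⟩
    rw [e1, e2] at hc
    refine ⟨⟨by exact_mod_cast (Ne.symm hij), ?_⟩, by rw [show pvMaskL (pvW ts j).toList p = pvMaskL (pvW ts i).toList p from hm.symm]⟩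
    simp only [Option.getD_some]
    intro e
    exact hc (by simp [e])

theorem pv_swap_perm {α : Type} (l1 l2 : List Nat) (F : Nat → Nat → List α) :
    (l1.flatMap (fun p => l2.flatMap (fun j => F p j))).Perm
      (l2.flatMap (fun j => l1.flatMap (fun p => F p j))) := by
  induction l1 with
  | nil => simp
  | cons p l1 ih =>
      simp only [List.flatMap_cons]
      refine List.Perm.trans (List.Perm.append_left _ ih) ?_
      exact List.flatMap_append_perm l2 (fun j => F p j)
        (fun j => l1.flatMap (fun p => F p j))

theorem pv_partners_perm (ts : List String) (h : Pre_simplify_logic ts) (i : Nat)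
    (hi : i < ts.length) : (pvPartnersL ts i).Perm (pvTarget ts i) := by
  unfold pvPartnersL
  refine List.Perm.trans (pv_swap_perm _ _ _) ?_
  have : ∀ j ∈ List.range ts.length,
      (List.range (pvW ts i).toList.length).flatMap (fun p =>
        if pvAdj? (pvW ts i).toList (pvW ts j).toList = some p ∧ i ≠ j
        then [((j : Int), pvMask (pvW ts i) (p : Int))] else [])
      = (if i ≠ j then
          match pvAdj? (pvW ts i).toList (pvW ts j).toList with
          | some p => [((j : Int), String.ofList (pvMaskL (pvW ts i).toList p))]
          | none => []
         else []) := by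
    intro j hj
    by_cases hij : i = j
    · simp [hij]
    · rcases ha : pvAdj? (pvW ts i).toList (pvW ts j).toList with _ | p
      · simp only [ha]
        rw [List.flatMap_eq_nil_iff.mpr]
        · simp [hij]
        · intro p _
          simp [ha]
      · have hplt : p < (pvW ts i).toList.length := pvAdj?_lt ha
        have hsingle : ∀ q ∈ List.range (pvW ts i).toList.length,
            (if some p = some q ∧ i ≠ j
             then [((j : Int), pvMask (pvW ts i) (q : Int))] else [])
            = (if q = p then [((j : Int), pvMask (pvW ts i) (p : Int))] else []) := by
          intro q _
          by_cases hqp : q = p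
          · subst hqp; simp [hij]
          · simp [hij, hqp]
            intro e
            exact absurd e.symm hqp
        rw [pv_flatMap_congr hsingle]
        rw [pv_flatMap_if _ (fun q => q = p) (fun _ => ((j : Int), pvMask (pvW ts i) (p : Int)))]
        have : (List.range (pvW ts i).toList.length).filter (fun q => decide (q = p)) = [p] := by
          apply pv_filter_eq_single hplt (by simp)
          intro q _ hq; simpa using hq
        rw [this]
        simp [pv_pvMask_eq _ _ hplt, hij]
  rw [pv_flatMap_congr this]
  unfold pvTarget
  exact List.Perm.refl _

theorem pv_target_pairwise (ts : List String) (i : Nat) :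
    List.Pairwise (fun a b => a.1 < b.1) (pvTarget ts i) := by
  unfold pvTarget
  have : ∀ m : Nat, List.Pairwise (fun (a b : Int × String) => a.1 < b.1)
      ((List.range m).flatMap (fun j =>
        if i ≠ j then
          match pvAdj? (pvW ts i).toList (pvW ts j).toList with
          | some p => [((j : Int), String.ofList (pvMaskL (pvW ts i).toList p))]
          | none => []
        else [])) := by
    intro m
    induction m with
    | zero => simp
    | succ m ih =>
        rw [List.range_succ, List.flatMap_append]
        rw [List.pairwise_append]
        refine ⟨ih, ?_, ?_⟩
        · simp only [List.flatMap_cons, List.flatMap_nil, List.append_nil]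
          by_cases hij : i = m
          · simp [hij]
          · rcases ha : pvAdj? (pvW ts i).toList (pvW ts m).toList with _ | p <;>
              simp [hij, ha]
        · intro a ha b hb
          simp only [List.mem_flatMap, List.mem_range] at ha
          obtain ⟨j, hjm, haj⟩ := ha
          have ha1 : a.1 = (j : Int) := by
            by_cases hij : i = j
            · simp [hij] at haj
            · rcases hadj : pvAdj? (pvW ts i).toList (pvW ts j).toList with _ | p <;>
                simp [hij, hadj] at haj
              simp [haj]
          have hb1 : b.1 = (m : Int) := by
            simp only [List.flatMap_cons, List.flatMap_nil, List.append_nil] at hb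
            by_cases hij : i = m
            · simp [hij] at hb
            · rcases hadj : pvAdj? (pvW ts i).toList (pvW ts m).toList with _ | p <;>
                simp [hij, hadj] at hb
              simp [hb]
          rw [ha1, hb1]
          exact_mod_cast hjm
  exact this ts.length

theorem pv_sorted_partners (ts : List String) (h : Pre_simplify_logic ts) (i : Nat)
    (hi : i < ts.length) :
    PySem.List.sorted (pvPartnersL ts i) (fun pr => pr.1) = pvTarget ts i :=
  PySem.List.sorted_eq_of_perm_of_pairwise_lt _ _ _
    (pv_partners_perm ts h i hi).symm (pv_target_pairwise ts i)

theorem pv_partners_nil_iff (ts : List String) (h : Pre_simplify_logic ts) (i : Nat)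
    (hi : i < ts.length) : pvPartnersL ts i = [] ↔ pvTarget ts i = [] := by
  have hp := pv_partners_perm ts h i hi
  constructor
  · intro e; rw [e] at hp; exact hp.nil_eq.symm
  · intro e; rw [e] at hp; exact hp.symm.nil_eq.symm

theorem pv_target_nil (ts : List String) (i : Nat) (hi : i < ts.length) :
    pvTarget ts i = [] ↔ ¬ pvHasP ts i := by
  rw [List.eq_nil_iff_forall_not_mem]
  unfold pvTarget pvHasP
  constructor
  · intro hall
    rintro ⟨j, hjn, hji, hadj⟩
    rcases ha : pvAdj? (pvW ts i).toList (pvW ts j).toList with _ | p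
    · exact hadj ha
    · exact hall ((j : Int), String.ofList (pvMaskL (pvW ts i).toList p))
        (by
          simp only [List.mem_flatMap, List.mem_range]
          exact ⟨j, hjn, by simp [Ne.symm hji, ha]⟩)
  · intro hno x hx
    simp only [List.mem_flatMap, List.mem_range] at hx
    obtain ⟨j, hjn, hxj⟩ := hx
    by_cases hij : i = j
    · simp [hij] at hxj
    · rcases ha : pvAdj? (pvW ts i).toList (pvW ts j).toList with _ | p
      · simp [hij, ha] at hxj
      · exact hno ⟨j, hjn, Ne.symm hij, by simp [ha]⟩

def pvStepB (ts : List String) (st : List String × List String) (i : Nat) :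
    List String × List String :=
  (if pvTarget ts i ≠ [] then st.1
   else if pvW ts i ∈ st.1 then st.1 else st.1 ++ [pvW ts i],
   if pvTarget ts i ≠ [] then
     List.foldl PySem.Set.add st.2 ((pvTarget ts i).map (fun pr => pr.2))
   else st.2)

theorem pv_stepB_eq (ts : List String) (h : Pre_simplify_logic ts)
    (g : PySem.Dict (Int × String) (List Int)) (i : Nat) (hi : i < ts.length)
    (hg : ∀ p : Nat, p < (pvW ts i).toList.length →
      g.getD ((p : Int), pvMask (pvW ts i) (p : Int)) []
        = (List.range ts.length).flatMap (fun j =>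
            if pvMask (pvW ts j) (p : Int) = pvMask (pvW ts i) (p : Int)
            then [(j : Int)] else []))
    (acc : List String × List String) :
    (if ((List.range (pvW ts i).toList.length).foldl
        (fun ps p =>
          (g.getD (((p : Nat) : Int), pvMask (pvW ts i) ((p : Nat) : Int)) []).foldl
            (fun ps j =>
              if j ≠ (i : Int) ∧
                 (PySem.Str.pyGet? (PySem.List.pyGetD ts j "") ((p : Nat) : Int)).getD ' ' ≠
                   (PySem.Str.pyGet? (pvW ts i) ((p : Nat) : Int)).getD ' '
              then ps ++ [(j, pvMask (pvW ts i) ((p : Nat) : Int))] else ps) ps)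
        ([] : List (Int × String))) ≠ [] then
       (acc.1, (PySem.List.sorted ((List.range (pvW ts i).toList.length).foldl
        (fun ps p =>
          (g.getD (((p : Nat) : Int), pvMask (pvW ts i) ((p : Nat) : Int)) []).foldl
            (fun ps j =>
              if j ≠ (i : Int) ∧
                 (PySem.Str.pyGet? (PySem.List.pyGetD ts j "") ((p : Nat) : Int)).getD ' ' ≠
                   (PySem.Str.pyGet? (pvW ts i) ((p : Nat) : Int)).getD ' '
              then ps ++ [(j, pvMask (pvW ts i) ((p : Nat) : Int))] else ps) ps)
        ([] : List (Int × String))) (fun pr => pr.1)).foldl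
          (fun ed pr => if pr.2 ∈ ed then ed else ed ++ [pr.2]) acc.2)
     else (if pvW ts i ∈ acc.1 then acc.1 else acc.1 ++ [pvW ts i], acc.2))
      = pvStepB ts acc i := by
  have hpart : (List.range (pvW ts i).toList.length).foldl
      (fun ps p =>
        (g.getD (((p : Nat) : Int), pvMask (pvW ts i) ((p : Nat) : Int)) []).foldl
          (fun ps j =>
            if j ≠ (i : Int) ∧
               (PySem.Str.pyGet? (PySem.List.pyGetD ts j "") ((p : Nat) : Int)).getD ' ' ≠
                 (PySem.Str.pyGet? (pvW ts i) ((p : Nat) : Int)).getD ' '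
            then ps ++ [(j, pvMask (pvW ts i) ((p : Nat) : Int))] else ps) ps)
      ([] : List (Int × String)) = pvPartnersL ts i := by
    rw [PySem.List.foldl_congr_mem (List.range (pvW ts i).toList.length) _
      (fun ps p => ps ++ (List.range ts.length).flatMap (fun j =>
        if pvAdj? (pvW ts i).toList (pvW ts j).toList = some p ∧ i ≠ j
        then [((j : Int), pvMask (pvW ts i) (p : Int))] else [])) [] ?_]
    · rw [PySem.List.foldl_append_eq_flatMap, List.nil_append]
      rfl
    · intro ps p hp
      have hplt : p < (pvW ts i).toList.length := List.mem_range.mp hp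
      rw [hg p hplt]
      rw [pv_flatMap_if _ (fun j => pvMask (pvW ts j) (p : Int) = pvMask (pvW ts i) (p : Int))
        (fun j => (j : Int))]
      rw [List.foldl_map]
      rw [PySem.List.foldl_append_ite
        (fun (j : Nat) => (j : Int) ≠ (i : Int) ∧
          (PySem.Str.pyGet? (PySem.List.pyGetD ts ((j : Nat) : Int) "") (p : Int)).getD ' ' ≠
            (PySem.Str.pyGet? (pvW ts i) (p : Int)).getD ' ')
        (fun j => ((j : Int), pvMask (pvW ts i) (p : Int)))]
      rw [List.filter_filter]
      congr 1
      rw [pv_flatMap_if _ (fun j => pvAdj? (pvW ts i).toList (pvW ts j).toList = some p ∧ i ≠ j)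
        (fun j => ((j : Int), pvMask (pvW ts i) (p : Int)))]
      congr 1
      apply List.filter_congr
      intro j hj
      have hjn : j < ts.length := List.mem_range.mp hj
      have hiff := pv_adjcond ts h hi hjn hplt
      rw [pv_pyGetD_W]
      rw [← Bool.decide_and]
      exact decide_eq_decide.mpr hiff
  simp only [hpart]
  by_cases hnil : pvPartnersL ts i = []
  · have htn : pvTarget ts i = [] := (pv_partners_nil_iff ts h i hi).mp hnil
    simp [hnil, pvStepB, htn]
  · have htn : pvTarget ts i ≠ [] := fun e => hnil ((pv_partners_nil_iff ts h i hi).mpr e)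
    rw [if_pos hnil]
    rw [pv_sorted_partners ts h i hi]
    rw [PySem.List.foldl_congr_mem (pvTarget ts i) _
      (fun ed pr => PySem.Set.add ed pr.2) acc.2
      (fun ed pr _ => (PySem.Set.add_eq_ite ed pr.2).symm)]
    rw [show (pvTarget ts i).foldl (fun ed pr => PySem.Set.add ed pr.2) acc.2
        = ((pvTarget ts i).map (fun pr => pr.2)).foldl PySem.Set.add acc.2 from
      (List.foldl_map).symm]
    simp [pvStepB, htn]

theorem pv_masks_eq (ts : List String) (i : Nat) :
    (pvTarget ts i).map (fun pr => pr.2)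
      = (List.range ts.length).flatMap (fun j => pvBlockM ts i j) := by
  unfold pvTarget
  rw [List.map_flatMap]
  apply pv_flatMap_congr
  intro j _
  by_cases hij : i = j
  · simp [hij, pvBlockM]
  · rcases ha : pvAdj? (pvW ts i).toList (pvW ts j).toList with _ | p <;>
      simp [hij, ha, pvBlockM, pvMaskL]

theorem pv_foldB (ts : List String) (h : Pre_simplify_logic ts) :
    (List.range ts.length).foldl (pvStepB ts) ([], [])
      = (pvSolo ts, List.foldl PySem.Set.add [] (pvMB ts)) := by
  unfold pvStepB
  rw [PySem.List.foldl_prod_mk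
    (f := fun s (i : Nat) => if pvTarget ts i ≠ [] then s
      else if pvW ts i ∈ s then s else s ++ [pvW ts i])
    (g := fun s (i : Nat) => if pvTarget ts i ≠ [] then
        List.foldl PySem.Set.add s ((pvTarget ts i).map (fun pr => pr.2))
      else s)]
  have hsolo : (List.range ts.length).foldl
      (fun s (i : Nat) => if pvTarget ts i ≠ [] then s
        else if pvW ts i ∈ s then s else s ++ [pvW ts i]) []
      = pvSolo ts := by
    unfold pvSolo
    apply PySem.List.foldl_congr_mem
    intro acc i hi
    have hi' : i < ts.length := List.mem_range.mp hi
    unfold pvSoloStep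
    by_cases hP : pvHasP ts i
    · have : pvTarget ts i ≠ [] := fun e => ((pv_target_nil ts i hi').mp e) hP
      simp [this, hP, pvHasPb_iff]
    · have : pvTarget ts i = [] := (pv_target_nil ts i hi').mpr hP
      simp [this, hP, pvHasPb_iff]
  have hed : (List.range ts.length).foldl
      (fun s (i : Nat) => if pvTarget ts i ≠ [] then
        List.foldl PySem.Set.add s ((pvTarget ts i).map (fun pr => pr.2))
      else s) []
      = List.foldl PySem.Set.add [] (pvMB ts) := by
    rw [PySem.List.foldl_congr_mem (List.range ts.length) _
      (fun s (i : Nat) => List.foldl PySem.Set.add s ((pvTarget ts i).map (fun pr => pr.2))) []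
      (fun s i _ => by
        by_cases hnil : pvTarget ts i = []
        · rw [if_neg (by simp [hnil])]
          simp [hnil]
        · rw [if_pos hnil])]
    rw [show (List.range ts.length).foldl
        (fun s (i : Nat) => List.foldl PySem.Set.add s ((pvTarget ts i).map (fun pr => pr.2))) []
        = (((List.range ts.length).map (fun i => (pvTarget ts i).map (fun pr => pr.2))).flatten).foldl
            PySem.Set.add [] from by
      rw [List.foldl_flatten, List.foldl_map]]
    rw [← List.flatMap_def]
    congr 1
    unfold pvMB
    apply pv_flatMap_congr
    intro i _
    exact pv_masks_eq ts i
  rw [hsolo, hed]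

theorem pv_foldl_add_absorb (l : List String) (s : PySem.Set String)
    (hsub : ∀ x ∈ l, x ∈ s) : List.foldl PySem.Set.add s l = s := by
  induction l generalizing s with
  | nil => rfl
  | cons a l ih =>
      rw [List.foldl_cons, PySem.Set.add_of_mem (hsub a (by simp))]
      exact ih s (fun x hx => hsub x (by simp [hx]))

theorem pv_mem_foldl_add_self (l : List String) (s : PySem.Set String) (x : String)
    (hx : x ∈ l) : x ∈ List.foldl PySem.Set.add s l := by
  have := (PySem.Set.mem_foldl_add l (fun y => y) s x).mpr (Or.inr ⟨x, hx, rfl⟩)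
  exact this

theorem pv_double (g : Nat → List String) (l : List Nat) (s : PySem.Set String) :
    List.foldl PySem.Set.add s (l.flatMap (fun j => g j ++ g j))
      = List.foldl PySem.Set.add s (l.flatMap g) := by
  induction l generalizing s with
  | nil => rfl
  | cons a l ih =>
      rw [List.flatMap_cons, List.flatMap_cons]
      rw [List.foldl_append, List.foldl_append, List.foldl_append]
      rw [pv_foldl_add_absorb (g a) _ (fun x hx => pv_mem_foldl_add_self (g a) s x hx)]
      exact ih _

theorem pv_MA_MB (ts : List String) :
    PySem.Set.ofList (pvMA ts) = PySem.Set.ofList (pvMB ts) := by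
  rw [PySem.Set.ofList_eq_foldl, PySem.Set.ofList_eq_foldl]
  unfold pvMA pvMB
  rw [show ∀ (F : Nat → List String),
      List.foldl PySem.Set.add [] ((List.range ts.length).flatMap F)
        = (List.range ts.length).foldl (fun a i => List.foldl PySem.Set.add a (F i)) []
      from fun F => by rw [List.flatMap_def, List.foldl_flatten, List.foldl_map]]
  rw [show ∀ (F : Nat → List String),
      List.foldl PySem.Set.add [] ((List.range ts.length).flatMap F)
        = (List.range ts.length).foldl (fun a i => List.foldl PySem.Set.add a (F i)) []
      from fun F => by rw [List.flatMap_def, List.foldl_flatten, List.foldl_map]]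
  apply PySem.List.foldl_congr_mem
  intro acc i _
  exact pv_double (fun j => pvBlockM ts i j) (List.range ts.length) acc

theorem pv_B_eq (ts : List String) (h : Pre_simplify_logic ts) :
    simplify_logic_alt ts = pvSolo ts ++ PySem.Set.ofList (pvMB ts) := by
  unfold simplify_logic_alt
  simp only [PySem.List.pyRange_zero_natCast, List.foldl_map, pv_pyGetD_W]
  rw [PySem.List.foldl_congr_mem (List.range ts.length) _
    (fun acc (i : Nat) => acc ++ (List.range (pvW ts i).toList.length).map
      (fun (p : Nat) => (((p : Int), pvMask (pvW ts i) (p : Int)), (i : Int)))) []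
    (fun acc i hi => by
      rw [pv_width_eq ts h i (List.mem_range.mp hi), PySem.List.pyRange_zero_natCast,
        List.foldl_map, PySem.List.foldl_append_singleton_eq_map])]
  rw [PySem.List.foldl_append_eq_flatMap, List.nil_append]
  rw [show (List.range ts.length).flatMap (fun i =>
      (List.range (pvW ts i).toList.length).map
        (fun (p : Nat) => (((p : Int), pvMask (pvW ts i) (p : Int)), (i : Int))))
      = pvPairs ts from rfl]
  rw [PySem.List.foldl_congr_mem (List.range ts.length) _ (pvStepB ts) ([], [])
    (fun acc i hi => by
      rw [pv_width_eq ts h i (List.mem_range.mp hi), PySem.List.pyRange_zero_natCast,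
        List.foldl_map]
      exact pv_stepB_eq ts h _ i (List.mem_range.mp hi)
        (fun p hp => pv_groups_getD ts h i (List.mem_range.mp hi) p hp) acc)]
  rw [pv_foldB ts h]
  rw [← PySem.Set.ofList_eq_foldl]

-- ===== VERDICT (by name: the statement is the Claim_ definition above) =====
theorem simplify_logic_spec : Claim_equal_simplify_logic := by
  intro ts _ hpre
  unfold Spec_simplify_logic
  rw [pv_A_eq ts hpre, pv_B_eq ts hpre, pv_MA_MB ts]
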